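-- pv_equiv track=rewrite | github.com/timothyfroehlich/PinPoint | .agent/skills/pinpoint-commit/scripts/generate-commit-message.py | detect_type
-- ===== SOURCE A (Python) =====
-- from typing import List, Optional, Tuple
--
-- def detect_type(files: List[str]) -> str:
--     """Detect commit type from changed files."""
--     # Simple heuristics
--     has_tests = any("test" in f or "spec" in f for f in files)
--     has_docs = any(f.endswith(".md") for f in files)
--     has_migrations = any("migrations" in f for f in files)
--     has_src = any(f.startswith("src/") for f in files)
--
--     if has_docs and not has_src:
--         return "docs"
--     elif has_tests and not has_src:
--         return "test"
--     elif has_migrations: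
--         return "chore"
--     else:
--         # Default to feat for src changes
--         return "feat"
-- ===== SOURCE B (Python) =====
-- # 16-entry lookup table indexed by the OR of per-file 4-bit masks:
-- # bit0 = test/spec, bit1 = .md, bit2 = migrations, bit3 = src/
-- _TABLE = ["feat", "test", "docs", "docs", "chore", "test", "docs", "docs",
--           "feat", "feat", "feat", "feat", "chore", "chore", "chore", "chore"]
--
-- def _mask(f):
--     m = 0
--     if "test" in f or "spec" in f:
--         m |= 1
--     if f.endswith(".md"):
--         m |= 2
--     if "migrations" in f:
--         m |= 4
--     if f.startswith("src/"):
--         m |= 8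
--     return m
--
-- def detect_type(files):
--     """Detect commit type from changed files."""
--     m = 0
--     for f in files:
--         m |= _mask(f)
--     return _TABLE[m]
-- ===== Notes on version B (the rewrite author's own statement) =====
-- stated objective: alternative
-- what changed: B maps each file to a 4-bit category mask, ORs all masks in one reduction, and returns the answer from a precomputed 16-entry lookup table, eliminating A's four any(...) scans and its runtime branch ladder.
import Mathlib
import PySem

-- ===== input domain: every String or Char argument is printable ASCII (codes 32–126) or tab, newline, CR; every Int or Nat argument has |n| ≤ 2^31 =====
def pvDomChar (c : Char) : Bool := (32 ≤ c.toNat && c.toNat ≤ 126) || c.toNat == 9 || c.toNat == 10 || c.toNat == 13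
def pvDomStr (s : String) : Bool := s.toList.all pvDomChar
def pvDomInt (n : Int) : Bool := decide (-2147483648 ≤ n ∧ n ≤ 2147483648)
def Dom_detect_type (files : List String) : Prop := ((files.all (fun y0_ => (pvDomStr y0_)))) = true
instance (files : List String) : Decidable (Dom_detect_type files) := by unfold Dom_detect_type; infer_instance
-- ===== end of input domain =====

-- B replaces A's four any(...) scans and branch ladder by a per-file bitmask ORed in one pass and a 16-entry lookup table (objective: alternative).

-- ===== PORT A =====
-- Port of A: four separate any-scans over files, then the branch ladder.
def detect_type (files : List String) : String :=
  let has_tests := files.any (fun f => PySem.Str.isIn "test" f || PySem.Str.isIn "spec" f)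
  let has_docs := files.any (fun f => PySem.Str.endswith f ".md")
  let has_migrations := files.any (fun f => PySem.Str.isIn "migrations" f)
  let has_src := files.any (fun f => PySem.Str.startswith f "src/")
  if has_docs && !has_src then "docs"
  else if has_tests && !has_src then "test"
  else if has_migrations then "chore"
  else "feat"

-- ===== PORT B =====
-- Port of B's _TABLE literal.
def pvTable : List String :=
  ["feat", "test", "docs", "docs", "chore", "test", "docs", "docs",
   "feat", "feat", "feat", "feat", "chore", "chore", "chore", "chore"]

-- Port of B's _mask: build the 4-bit mask with successive |=.
def pvMask (f : String) : Nat :=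
  let m := 0
  let m := if PySem.Str.isIn "test" f || PySem.Str.isIn "spec" f then m ||| 1 else m
  let m := if PySem.Str.endswith f ".md" then m ||| 2 else m
  let m := if PySem.Str.isIn "migrations" f then m ||| 4 else m
  let m := if PySem.Str.startswith f "src/" then m ||| 8 else m
  m

-- Port of B: OR the masks in one fold, then index the table (m < 16 always, so getD never uses the default).
def detect_type_alt (files : List String) : String :=
  let m := files.foldl (fun m f => m ||| pvMask f) 0
  pvTable.getD m ""

-- ===== PRECONDITION & SPEC =====
def Spec_detect_type (files : List String) (out : String) : Prop := out = detect_type_alt files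
instance (files : List String) (out : String) : Decidable (Spec_detect_type files out) := by unfold Spec_detect_type; infer_instance

-- ===== CLAIM (what is proved, stated in full; the proofs are below) =====
def Claim_equal_detect_type : Prop := ∀ (files : List String), Dom_detect_type files → Spec_detect_type files (detect_type files)

-- ===== LEMMAS AND PROOFS =====
-- Merging two 4-bit masks ORs the flags bitwise (256 Bool cases).
theorem bit_merge (a b c d ta tb tc td : Bool) :
    (((if a then 1 else 0) ||| (if b then 2 else 0) ||| (if c then 4 else 0) ||| (if d then 8 else 0)) |||
     ((if ta then 1 else 0) ||| (if tb then 2 else 0) ||| (if tc then 4 else 0) ||| (if td then 8 else 0)))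
    = ((if a || ta then 1 else 0) ||| (if b || tb then 2 else 0) |||
       (if c || tc then 4 else 0) ||| (if d || td then 8 else 0)) := by
  revert a b c d ta tb tc td; decide

-- pvMask as the OR of four conditional bits.
theorem pvMask_eq (f : String) :
    pvMask f
    = ((if PySem.Str.isIn "test" f || PySem.Str.isIn "spec" f then 1 else 0) |||
       (if PySem.Str.endswith f ".md" then 2 else 0) |||
       (if PySem.Str.isIn "migrations" f then 4 else 0) |||
       (if PySem.Str.startswith f "src/" then 8 else 0)) := by
  unfold pvMask
  cases PySem.Str.isIn "test" f <;> cases PySem.Str.isIn "spec" f <;>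
    cases PySem.Str.endswith f ".md" <;> cases PySem.Str.isIn "migrations" f <;>
    cases PySem.Str.startswith f "src/" <;> rfl

-- The fold of masks equals the OR of the four "any" flags encoded as bits.
theorem mask_fold (files : List String) (acc : Nat) :
    files.foldl (fun m f => m ||| pvMask f) acc
    = acc |||
      ((if files.any (fun f => PySem.Str.isIn "test" f || PySem.Str.isIn "spec" f) then 1 else 0) |||
       (if files.any (fun f => PySem.Str.endswith f ".md") then 2 else 0) |||
       (if files.any (fun f => PySem.Str.isIn "migrations" f) then 4 else 0) |||
       (if files.any (fun f => PySem.Str.startswith f "src/") then 8 else 0)) := by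
  induction files generalizing acc with
  | nil => simp
  | cons x t ih =>
    simp only [List.foldl_cons, List.any_cons]
    rw [ih, pvMask_eq, Nat.or_assoc]
    congr 1
    exact bit_merge _ _ _ _ _ _ _ _

-- Table lookup agrees with the branch ladder on all 16 flag combinations.
theorem table_ladder (a b c d : Bool) :
    pvTable.getD ((if a then 1 else 0) ||| (if b then 2 else 0) |||
                  (if c then 4 else 0) ||| (if d then 8 else 0)) ""
    = (if b && !d then "docs" else if a && !d then "test" else if c then "chore" else "feat") := by
  cases a <;> cases b <;> cases c <;> cases d <;> decide

-- ===== VERDICT (by name: the statement is the Claim_ definition above) =====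
theorem detect_type_spec : Claim_equal_detect_type := by
  intro files _
  unfold Spec_detect_type detect_type detect_type_alt
  rw [mask_fold]
  simpa using (table_ladder
    (files.any (fun f => PySem.Str.isIn "test" f || PySem.Str.isIn "spec" f))
    (files.any (fun f => PySem.Str.endswith f ".md"))
    (files.any (fun f => PySem.Str.isIn "migrations" f))
    (files.any (fun f => PySem.Str.startswith f "src/"))).symm
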